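-- pv_equiv track=rewrite | github.com/andremagnoribeiro/segmentacaoVideoPython | topic_video_clustering/classificationKeyPhraseVideo.py | frequencySeguencia
-- ===== SOURCE A (Python) =====
-- def frequencySeguencia(lista):
--     n=lista
--
--     g=[]
--     x=True
--     for i in range(0,len(n)-1):
--
--         if int(n[i])+1==int(n[i+1]) or int(n[i])+2==int(n[i+1]) or int(n[i])==int(n[i+1])  or int(n[i])==int(n[i+1]) :
--             g.append(n[i])
--             if i==len(n)-2:
--                 g.append(n[i+1])
--
--         else:
--             g=[]
--
--     return g
-- ===== SOURCE B (Python) =====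
-- def frequencySeguencia(lista):
--     # boundary-then-slice: find the start of the trailing near-consecutive run,
--     # then return it by slicing (a lone last element is not a run -> []).
--     start = 0
--     for i in range(len(lista) - 1):
--         d = int(lista[i + 1]) - int(lista[i])
--         if d not in (0, 1, 2):
--             start = i + 1
--     if start == len(lista) - 1:
--         return []
--     return lista[start:]
-- ===== Notes on version B (the rewrite author's own statement) =====
-- stated objective: simpler
-- what changed: Instead of incrementally building the run with append and resetting the accumulator list on every break, B only tracks the index where the trailing run starts and returns a single slice lista[start:] at the end (empty when the run would be a lone last element), eliminating the list rebuilding and the special-case append of the last element.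
import Mathlib
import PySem

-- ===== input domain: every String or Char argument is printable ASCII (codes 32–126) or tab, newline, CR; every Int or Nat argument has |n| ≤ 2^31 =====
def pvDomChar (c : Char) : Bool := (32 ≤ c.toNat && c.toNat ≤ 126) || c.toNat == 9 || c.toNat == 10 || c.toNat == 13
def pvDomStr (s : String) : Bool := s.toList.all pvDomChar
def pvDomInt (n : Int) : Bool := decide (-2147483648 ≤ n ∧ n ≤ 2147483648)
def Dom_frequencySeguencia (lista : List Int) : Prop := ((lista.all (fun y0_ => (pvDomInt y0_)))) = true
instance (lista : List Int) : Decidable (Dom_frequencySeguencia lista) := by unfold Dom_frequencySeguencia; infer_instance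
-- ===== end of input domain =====

-- B replaces A's incremental append/reset run building with a start-index pass plus one final slice (same cost, simpler shape).

-- ===== PORT A =====
-- literal port of A: fold over range(0, len(n)-1), appending / resetting g
-- (indices i, i+1 are always in range, so pyGetD with default 0 is exact here)
def frequencySeguencia (lista : List Int) : List Int :=
  let n := lista
  (PySem.List.pyRange 0 ((n.length : Int) - 1) 1).foldl
    (fun g i =>
      let a := PySem.List.pyGetD n i 0
      let b := PySem.List.pyGetD n (i + 1) 0
      if a + 1 = b ∨ a + 2 = b ∨ a = b ∨ a = b then
        let g := g ++ [a]
        if i = (n.length : Int) - 2 then g ++ [b] else g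
      else []) []

-- ===== PORT B =====
-- literal port of Source B: compute the start of the trailing run, then slice
def frequencySeguencia_alt (lista : List Int) : List Int :=
  let start := (PySem.List.pyRange 0 ((lista.length : Int) - 1) 1).foldl
    (fun start i =>
      let d := PySem.List.pyGetD lista (i + 1) 0 - PySem.List.pyGetD lista i 0
      if d = 0 ∨ d = 1 ∨ d = 2 then start else i + 1) 0
  if start = (lista.length : Int) - 1 then []
  else PySem.List.slice lista (some start) none

-- ===== PRECONDITION & SPEC =====
def Spec_frequencySeguencia (lista : List Int) (out : List Int) : Prop := out = frequencySeguencia_alt lista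
instance (lista : List Int) (out : List Int) : Decidable (Spec_frequencySeguencia lista out) := by unfold Spec_frequencySeguencia; infer_instance

-- ===== CLAIM (what is proved, stated in full; the proofs are below) =====
def Claim_equal_frequencySeguencia : Prop := ∀ (lista : List Int), Dom_frequencySeguencia lista → Spec_frequencySeguencia lista (frequencySeguencia lista)

-- ===== LEMMAS AND PROOFS =====

-- A's loop body
def pvStepA (n : List Int) (g : List Int) (i : Int) : List Int :=
  let a := PySem.List.pyGetD n i 0
  let b := PySem.List.pyGetD n (i + 1) 0
  if a + 1 = b ∨ a + 2 = b ∨ a = b ∨ a = b then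
    let g := g ++ [a]
    if i = (n.length : Int) - 2 then g ++ [b] else g
  else []

-- B's loop body
def pvStepB (lista : List Int) (start : Int) (i : Int) : Int :=
  let d := PySem.List.pyGetD lista (i + 1) 0 - PySem.List.pyGetD lista i 0
  if d = 0 ∨ d = 1 ∨ d = 2 then start else i + 1

theorem pvFoldA_eq (lista : List Int) :
    frequencySeguencia lista =
      (PySem.List.pyRange 0 ((lista.length : Int) - 1) 1).foldl (pvStepA lista) [] := rfl

theorem pvFoldB_eq (lista : List Int) :
    frequencySeguencia_alt lista =
      (let start := (PySem.List.pyRange 0 ((lista.length : Int) - 1) 1).foldl (pvStepB lista) 0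
       if start = (lista.length : Int) - 1 then []
       else PySem.List.slice lista (some start) none) := rfl

-- joint invariant over the first m iterations (all before the last pair)
theorem pvInvariant (lista : List Int) (m : Nat) (hm : m + 2 ≤ lista.length) :
    ∃ s : Nat, s ≤ m ∧
      (PySem.List.pyRange 0 (m : Int) 1).foldl (pvStepB lista) 0 = (s : Int) ∧
      (PySem.List.pyRange 0 (m : Int) 1).foldl (pvStepA lista) [] = (lista.take m).drop s := by
  induction m with
  | zero =>
    exact ⟨0, le_refl 0, by simp [PySem.List.pyRange_one_eq_nil], by simp [PySem.List.pyRange_one_eq_nil]⟩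
  | succ m ih =>
    obtain ⟨s, hs, hB, hA⟩ := ih (by omega)
    have hrng : PySem.List.pyRange 0 ((m : Int) + 1) 1 = PySem.List.pyRange 0 (m : Int) 1 ++ [(m : Int)] := by
      exact PySem.List.pyRange_one_succ_right (by exact_mod_cast Int.natCast_nonneg _)
    have hmlt : m < lista.length := by omega
    have hm1lt : m + 1 < lista.length := by omega
    have ha : PySem.List.pyGetD lista (m : Int) 0 = lista[m] := by
      rw [PySem.List.pyGetD_natCast, List.getD_eq_getElem _ _ hmlt]
    have hb : PySem.List.pyGetD lista ((m : Int) + 1) 0 = lista[m + 1] := by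
      have hc1 : ((m : Int) + 1) = ((m + 1 : Nat) : Int) := by push_cast; ring
      rw [hc1, PySem.List.pyGetD_natCast, List.getD_eq_getElem _ _ hm1lt]
    have hcast : ((m + 1 : Nat) : Int) = (m : Int) + 1 := by push_cast; ring
    rw [hcast, hrng, List.foldl_append, List.foldl_append, hA, hB]
    simp only [List.foldl_cons, List.foldl_nil]
    by_cases hc : lista[m + 1] - lista[m] = 0 ∨ lista[m + 1] - lista[m] = 1 ∨ lista[m + 1] - lista[m] = 2
    · refine ⟨s, by omega, ?_, ?_⟩
      · simp [pvStepB, ha, hb, hc]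
      · have hC : lista[m] + 1 = lista[m + 1] ∨ lista[m] + 2 = lista[m + 1] ∨ lista[m] = lista[m + 1] ∨ lista[m] = lista[m + 1] := by omega
        have hne : (m : Int) ≠ (lista.length : Int) - 2 := by omega
        have htake : lista.take (m + 1) = lista.take m ++ [lista[m]] := by
          rw [List.take_add_one, List.getElem?_eq_getElem hmlt]; rfl
        rw [pvStepA]
        simp only [ha, hb, if_pos hC, if_neg hne]
        rw [htake, List.drop_append_of_le_length (by simp [List.length_take]; omega)]
    · refine ⟨m + 1, le_refl _, ?_, ?_⟩
      · simp [pvStepB, ha, hb, hc]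
      · have hC : ¬ (lista[m] + 1 = lista[m + 1] ∨ lista[m] + 2 = lista[m + 1] ∨ lista[m] = lista[m + 1] ∨ lista[m] = lista[m + 1]) := by omega
        rw [pvStepA]
        simp only [ha, hb, if_neg hC]
        rw [List.drop_eq_nil_of_le (by rw [List.length_take]; omega)]

-- ===== VERDICT (by name: the statement is the Claim_ definition above) =====
theorem frequencySeguencia_spec : Claim_equal_frequencySeguencia := by
  intro lista _
  unfold Spec_frequencySeguencia
  rw [pvFoldA_eq, pvFoldB_eq]
  match hL : lista.length with
  | 0 =>
    have : lista = [] := List.eq_nil_of_length_eq_zero hL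
    subst this; simp [PySem.List.pyRange_one_eq_nil, PySem.List.slice]
  | 1 =>
    norm_num [PySem.List.pyRange_one_eq_nil]
  | (L + 2) =>
    obtain ⟨s, hs, hB, hA⟩ := pvInvariant lista L (by omega)
    have hLlen : lista.length = L + 2 := hL
    have hcast : ((L + 2 : Nat) : Int) - 1 = ((L : Int) + 1) := by push_cast; ring
    have hrng : PySem.List.pyRange 0 ((L : Int) + 1) 1 = PySem.List.pyRange 0 (L : Int) 1 ++ [(L : Int)] :=
      PySem.List.pyRange_one_succ_right (by exact_mod_cast Int.natCast_nonneg _)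
    have hmlt : L < lista.length := by omega
    have hm1lt : L + 1 < lista.length := by omega
    have ha : PySem.List.pyGetD lista (L : Int) 0 = lista[L] := by
      rw [PySem.List.pyGetD_natCast, List.getD_eq_getElem _ _ hmlt]
    have hb : PySem.List.pyGetD lista ((L : Int) + 1) 0 = lista[L + 1] := by
      have hc1 : ((L : Int) + 1) = ((L + 1 : Nat) : Int) := by push_cast; ring
      rw [hc1, PySem.List.pyGetD_natCast, List.getD_eq_getElem _ _ hm1lt]
    have hsplit : lista = lista.take L ++ [lista[L]] ++ [lista[L + 1]] := by
      have h1 : lista.take (L + 1) = lista.take L ++ [lista[L]] := by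
        rw [List.take_add_one, List.getElem?_eq_getElem hmlt]; rfl
      have h2 : lista.take (L + 2) = lista.take (L + 1) ++ [lista[L + 1]] := by
        rw [List.take_add_one, List.getElem?_eq_getElem hm1lt]; rfl
      have h3 : lista.take (L + 2) = lista := by rw [← hLlen, List.take_length]
      rw [h2, h1] at h3
      exact h3.symm
    rw [hcast, hrng, List.foldl_append, List.foldl_append, hA, hB]
    simp only [List.foldl_cons, List.foldl_nil]
    by_cases hc : lista[L + 1] - lista[L] = 0 ∨ lista[L + 1] - lista[L] = 1 ∨ lista[L + 1] - lista[L] = 2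
    · have hC : lista[L] + 1 = lista[L + 1] ∨ lista[L] + 2 = lista[L + 1] ∨ lista[L] = lista[L + 1] ∨ lista[L] = lista[L + 1] := by omega
      have hlast : (L : Int) = (lista.length : Int) - 2 := by rw [hLlen]; push_cast; ring
      have hBstep : pvStepB lista (s : Int) (L : Int) = (s : Int) := by
        simp [pvStepB, ha, hb, hc]
      have hAstep : pvStepA lista ((lista.take L).drop s) (L : Int) =
          (lista.take L).drop s ++ [lista[L]] ++ [lista[L + 1]] := by
        rw [pvStepA]; simp only [ha, hb, if_pos hC, if_pos hlast]
      rw [hAstep, hBstep]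
      have hne : ((s : Int)) ≠ (L : Int) + 1 := by omega
      rw [if_neg hne, PySem.List.slice_from_natCast]
      conv_rhs => rw [hsplit]
      rw [List.drop_append_of_le_length (by rw [List.length_append, List.length_take]; omega),
        List.drop_append_of_le_length (by rw [List.length_take]; omega)]
    · have hC : ¬ (lista[L] + 1 = lista[L + 1] ∨ lista[L] + 2 = lista[L + 1] ∨ lista[L] = lista[L + 1] ∨ lista[L] = lista[L + 1]) := by omega
      have hBstep : pvStepB lista (s : Int) (L : Int) = (L : Int) + 1 := by
        simp [pvStepB, ha, hb, hc]
      have hAstep : pvStepA lista ((lista.take L).drop s) (L : Int) = [] := by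
        rw [pvStepA]; simp only [ha, hb, if_neg hC]
      rw [hAstep, hBstep, if_pos (by omega)]
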